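-- pv_equiv track=rewrite | github.com/garrettmorton/F2018-507-Project3 | proj3_choc.py | check_no_duplicates
-- ===== SOURCE A (Python) =====
-- def check_no_duplicates(command, command_list):
--     matrix = [["sellcountry", "sourcecountry", "sellregion", "sourceregion"],
--         ["ratings", "cocoa", "bars_sold"],
--         ["top", "bottom"],
--         ["country", "region"],
--         ["sellers", "sources"]
--     ]
--     for row in matrix:
--         if command in row:
--             for item in command_list:
--                 if item in row:
--                     return False
--     return True
-- ===== SOURCE B (Python) =====
-- def check_no_duplicates(command, command_list):
--     matrix = [["sellcountry", "sourcecountry", "sellregion", "sourceregion"],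
--         ["ratings", "cocoa", "bars_sold"],
--         ["top", "bottom"],
--         ["country", "region"],
--         ["sellers", "sources"]
--     ]
--     group = {}
--     for i, row in enumerate(matrix):
--         for word in row:
--             group[word] = i
--     g = group.get(command)
--     if g is None:
--         return True
--     for item in command_list:
--         if group.get(item) == g:
--             return False
--     return True
-- ===== Notes on version B (the rewrite author's own statement) =====
-- stated objective: idiomatic
-- what changed: Replaces the per-row scan with membership tests by a keyword-to-group-index dict built once by flattening the matrix, a single get for the command and one pass over command_list comparing group indices.
import Mathlib
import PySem

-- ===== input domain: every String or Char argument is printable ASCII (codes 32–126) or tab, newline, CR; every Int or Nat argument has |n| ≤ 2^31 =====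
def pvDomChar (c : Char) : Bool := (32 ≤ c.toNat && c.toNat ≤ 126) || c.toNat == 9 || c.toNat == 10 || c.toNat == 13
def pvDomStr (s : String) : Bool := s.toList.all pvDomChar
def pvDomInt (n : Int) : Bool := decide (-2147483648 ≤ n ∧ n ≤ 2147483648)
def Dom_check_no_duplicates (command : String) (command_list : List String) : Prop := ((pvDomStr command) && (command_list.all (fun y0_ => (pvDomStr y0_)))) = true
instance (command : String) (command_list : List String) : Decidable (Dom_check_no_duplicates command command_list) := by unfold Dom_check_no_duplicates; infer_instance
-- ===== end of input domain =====

-- B replaces A's per-row membership scans by a keyword→group-index dict built once and a single pass (idiomatic; same cost at this fixed matrix size).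

-- ===== PORT A =====
def pvMatrix : List (List String) :=
  [["sellcountry", "sourcecountry", "sellregion", "sourceregion"],
   ["ratings", "cocoa", "bars_sold"],
   ["top", "bottom"],
   ["country", "region"],
   ["sellers", "sources"]]

-- A's outer loop over the matrix rows; the inner 'for item … return False' is the any-scan.
def pvGoRows (command : String) (command_list : List String) : List (List String) → Bool
  | [] => true
  | row :: rest =>
      if row.contains command then
        if command_list.any (fun item => row.contains item) then false
        else pvGoRows command command_list rest
      else pvGoRows command command_list rest

def check_no_duplicates (command : String) (command_list : List String) : Bool :=
  pvGoRows command command_list pvMatrix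

-- ===== PORT B =====
-- group = {}; for i, row in enumerate(matrix): for word in row: group[word] = i
def pvGroupIdx : PySem.Dict String Int :=
  (PySem.List.enumerate pvMatrix 0).foldl
    (fun d p => p.2.foldl (fun d' word => d'.insert word p.1) d)
    PySem.Dict.empty

def check_no_duplicates_alt (command : String) (command_list : List String) : Bool :=
  match pvGroupIdx.get? command with
  | none => true
  | some g => ! command_list.any (fun item => pvGroupIdx.get? item == some g)

-- ===== PRECONDITION & SPEC =====
def Spec_check_no_duplicates (command : String) (command_list : List String) (out : Bool) : Prop := out = check_no_duplicates_alt command command_list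
instance (command : String) (command_list : List String) (out : Bool) : Decidable (Spec_check_no_duplicates command command_list out) := by unfold Spec_check_no_duplicates; infer_instance

-- ===== CLAIM (what is proved, stated in full; the proofs are below) =====
def Claim_equal_check_no_duplicates : Prop := ∀ (command : String) (command_list : List String), Dom_check_no_duplicates command command_list → Spec_check_no_duplicates command command_list (check_no_duplicates command command_list)

-- ===== LEMMAS AND PROOFS =====

-- The built dict as a literal (insertion order = flattening order of the matrix).
lemma pvGroupIdx_eq : pvGroupIdx = PySem.Dict.mk
    [("sellcountry", 0), ("sourcecountry", 0), ("sellregion", 0), ("sourceregion", 0),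
     ("ratings", 1), ("cocoa", 1), ("bars_sold", 1),
     ("top", 2), ("bottom", 2),
     ("country", 3), ("region", 3),
     ("sellers", 4), ("sources", 4)] := by decide

-- Characterises the dict lookup by row membership.
set_option maxRecDepth 8192 in
lemma pvGroupIdx_char (s : String) : pvGroupIdx.get? s =
    if (["sellcountry", "sourcecountry", "sellregion", "sourceregion"] : List String).contains s then some 0
    else if (["ratings", "cocoa", "bars_sold"] : List String).contains s then some 1
    else if (["top", "bottom"] : List String).contains s then some 2
    else if (["country", "region"] : List String).contains s then some 3
    else if (["sellers", "sources"] : List String).contains s then some 4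
    else none := by
  rw [pvGroupIdx_eq]
  by_cases h0 : s = "sellcountry"; · subst h0; decide
  by_cases h1 : s = "sourcecountry"; · subst h1; decide
  by_cases h2 : s = "sellregion"; · subst h2; decide
  by_cases h3 : s = "sourceregion"; · subst h3; decide
  by_cases h4 : s = "ratings"; · subst h4; decide
  by_cases h5 : s = "cocoa"; · subst h5; decide
  by_cases h6 : s = "bars_sold"; · subst h6; decide
  by_cases h7 : s = "top"; · subst h7; decide
  by_cases h8 : s = "bottom"; · subst h8; decide
  by_cases h9 : s = "country"; · subst h9; decide
  by_cases h10 : s = "region"; · subst h10; decide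
  by_cases h11 : s = "sellers"; · subst h11; decide
  by_cases h12 : s = "sources"; · subst h12; decide
  have e0 : (("sellcountry" : String) == s) = false := by simp [Ne.symm h0]
  have e1 : (("sourcecountry" : String) == s) = false := by simp [Ne.symm h1]
  have e2 : (("sellregion" : String) == s) = false := by simp [Ne.symm h2]
  have e3 : (("sourceregion" : String) == s) = false := by simp [Ne.symm h3]
  have e4 : (("ratings" : String) == s) = false := by simp [Ne.symm h4]
  have e5 : (("cocoa" : String) == s) = false := by simp [Ne.symm h5]
  have e6 : (("bars_sold" : String) == s) = false := by simp [Ne.symm h6]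
  have e7 : (("top" : String) == s) = false := by simp [Ne.symm h7]
  have e8 : (("bottom" : String) == s) = false := by simp [Ne.symm h8]
  have e9 : (("country" : String) == s) = false := by simp [Ne.symm h9]
  have e10 : (("region" : String) == s) = false := by simp [Ne.symm h10]
  have e11 : (("sellers" : String) == s) = false := by simp [Ne.symm h11]
  have e12 : (("sources" : String) == s) = false := by simp [Ne.symm h12]
  have r0 : (["sellcountry", "sourcecountry", "sellregion", "sourceregion"] : List String).contains s = false := by simp [h0, h1, h2, h3]
  have r1 : (["ratings", "cocoa", "bars_sold"] : List String).contains s = false := by simp [h4, h5, h6]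
  have r2 : (["top", "bottom"] : List String).contains s = false := by simp [h7, h8]
  have r3 : (["country", "region"] : List String).contains s = false := by simp [h9, h10]
  have r4 : (["sellers", "sources"] : List String).contains s = false := by simp [h11, h12]
  simp [PySem.Dict.get?, e0, e1, e2, e3, e4, e5, e6, e7, e8, e9, e10, e11, e12]
  simp [h0, h1, h2, h3, h4, h5, h6, h7, h8, h9, h10, h11, h12]

lemma pvHrow0 (s : String) : pvGroupIdx.get? s = some 0 ↔ (["sellcountry", "sourcecountry", "sellregion", "sourceregion"] : List String).contains s = true := by
  rw [pvGroupIdx_char s]; split_ifs with a b c d e <;> simp_all <;>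
    (repeat' apply And.intro) <;> rintro rfl <;> simp_all

lemma pvHrow1 (s : String) : pvGroupIdx.get? s = some 1 ↔ (["ratings", "cocoa", "bars_sold"] : List String).contains s = true := by
  rw [pvGroupIdx_char s]; split_ifs with a b c d e <;> simp_all <;>
    (repeat' apply And.intro) <;> rintro rfl <;> simp_all

lemma pvHrow2 (s : String) : pvGroupIdx.get? s = some 2 ↔ (["top", "bottom"] : List String).contains s = true := by
  rw [pvGroupIdx_char s]; split_ifs with a b c d e <;> simp_all <;>
    (repeat' apply And.intro) <;> rintro rfl <;> simp_all

lemma pvHrow3 (s : String) : pvGroupIdx.get? s = some 3 ↔ (["country", "region"] : List String).contains s = true := by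
  rw [pvGroupIdx_char s]; split_ifs with a b c d e <;> simp_all <;>
    (repeat' apply And.intro) <;> rintro rfl <;> simp_all

lemma pvHrow4 (s : String) : pvGroupIdx.get? s = some 4 ↔ (["sellers", "sources"] : List String).contains s = true := by
  rw [pvGroupIdx_char s]; split_ifs with a b c d e <;> simp_all <;>
    (repeat' apply And.intro) <;> rintro rfl <;> simp_all

lemma pvAnyCongr {α : Type} {l : List α} {p q : α → Bool}
    (h : ∀ x ∈ l, p x = q x) : l.any p = l.any q := by
  induction l with
  | nil => rfl
  | cons a as ih => simp_all

-- A row fails to contain s whenever the dict does not map s to that row's index.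
lemma pvContainsFalse (row : List String) (g : Int)
    (hrow : ∀ s : String, pvGroupIdx.get? s = some g ↔ row.contains s = true)
    (s : String) (h : pvGroupIdx.get? s ≠ some g) : row.contains s = false := by
  cases hc : row.contains s
  · rfl
  · exact absurd ((hrow s).mpr hc) h

-- B's scan over command_list equals A's inner any-scan over the row containing the command.
lemma pvKey (command : String) (command_list : List String) (g : Int)
    (hg : pvGroupIdx.get? command = some g) (row : List String)
    (hrow : ∀ s : String, pvGroupIdx.get? s = some g ↔ row.contains s = true) :
    check_no_duplicates_alt command command_list
      = !command_list.any (fun item => row.contains item) := by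
  have hcongr : ∀ x ∈ command_list, (pvGroupIdx.get? x == some g) = row.contains x := by
    intro x _
    cases hc : row.contains x
    · have := pvContainsFalse row g hrow x
      by_cases hgx : pvGroupIdx.get? x = some g
      · rw [(hrow x).mp hgx] at hc; cases hc
      · simp [hgx]
    · simp [(hrow x).mpr hc]
  unfold check_no_duplicates_alt
  rw [hg]
  show (!command_list.any fun item => pvGroupIdx.get? item == some g) = _
  rw [pvAnyCongr hcongr]

-- ===== VERDICT (by name: the statement is the Claim_ definition above) =====
theorem check_no_duplicates_spec : Claim_equal_check_no_duplicates := by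
  intro command command_list _
  unfold Spec_check_no_duplicates
  rcases hget : pvGroupIdx.get? command with _ | g
  · -- command is in no group: A scans all rows without entering any inner loop, B gets none
    have c0 : (["sellcountry", "sourcecountry", "sellregion", "sourceregion"] : List String).contains command = false :=
      pvContainsFalse _ _ pvHrow0 command (by simp [hget])
    have c1 : (["ratings", "cocoa", "bars_sold"] : List String).contains command = false :=
      pvContainsFalse _ _ pvHrow1 command (by simp [hget])
    have c2 : (["top", "bottom"] : List String).contains command = false :=
      pvContainsFalse _ _ pvHrow2 command (by simp [hget])
    have c3 : (["country", "region"] : List String).contains command = false :=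
      pvContainsFalse _ _ pvHrow3 command (by simp [hget])
    have c4 : (["sellers", "sources"] : List String).contains command = false :=
      pvContainsFalse _ _ pvHrow4 command (by simp [hget])
    simp only [check_no_duplicates, check_no_duplicates_alt, pvMatrix, pvGoRows, hget,
      c0, c1, c2, c3, c4, Bool.false_eq_true, if_false]
  · have hchar := pvGroupIdx_char command
    rw [hget] at hchar
    split_ifs at hchar with a b c d e
    case _ =>
      obtain rfl := Option.some.inj hchar
      have hg' : pvGroupIdx.get? command = some 0 := (pvHrow0 command).mpr a
      have c1 : (["ratings", "cocoa", "bars_sold"] : List String).contains command = false :=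
        pvContainsFalse _ _ pvHrow1 command (by simp [hg'])
      have c2 : (["top", "bottom"] : List String).contains command = false :=
        pvContainsFalse _ _ pvHrow2 command (by simp [hg'])
      have c3 : (["country", "region"] : List String).contains command = false :=
        pvContainsFalse _ _ pvHrow3 command (by simp [hg'])
      have c4 : (["sellers", "sources"] : List String).contains command = false :=
        pvContainsFalse _ _ pvHrow4 command (by simp [hg'])
      rw [pvKey command command_list 0 hg' _ pvHrow0]
      simp only [check_no_duplicates, pvMatrix, pvGoRows, a, c1, c2, c3, c4, Bool.false_eq_true, if_false, if_true]
      cases hany : command_list.any (fun item => (["sellcountry", "sourcecountry", "sellregion", "sourceregion"] : List String).contains item) <;> simp [hany]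
    case _ =>
      obtain rfl := Option.some.inj hchar
      have hg' : pvGroupIdx.get? command = some 1 := (pvHrow1 command).mpr b
      have c0 : (["sellcountry", "sourcecountry", "sellregion", "sourceregion"] : List String).contains command = false :=
        pvContainsFalse _ _ pvHrow0 command (by simp [hg'])
      have c2 : (["top", "bottom"] : List String).contains command = false :=
        pvContainsFalse _ _ pvHrow2 command (by simp [hg'])
      have c3 : (["country", "region"] : List String).contains command = false :=
        pvContainsFalse _ _ pvHrow3 command (by simp [hg'])
      have c4 : (["sellers", "sources"] : List String).contains command = false :=
        pvContainsFalse _ _ pvHrow4 command (by simp [hg'])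
      rw [pvKey command command_list 1 hg' _ pvHrow1]
      simp only [check_no_duplicates, pvMatrix, pvGoRows, b, c0, c2, c3, c4, Bool.false_eq_true, if_false, if_true]
      cases hany : command_list.any (fun item => (["ratings", "cocoa", "bars_sold"] : List String).contains item) <;> simp [hany]
    case _ =>
      obtain rfl := Option.some.inj hchar
      have hg' : pvGroupIdx.get? command = some 2 := (pvHrow2 command).mpr c
      have c0 : (["sellcountry", "sourcecountry", "sellregion", "sourceregion"] : List String).contains command = false :=
        pvContainsFalse _ _ pvHrow0 command (by simp [hg'])
      have c1 : (["ratings", "cocoa", "bars_sold"] : List String).contains command = false :=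
        pvContainsFalse _ _ pvHrow1 command (by simp [hg'])
      have c3 : (["country", "region"] : List String).contains command = false :=
        pvContainsFalse _ _ pvHrow3 command (by simp [hg'])
      have c4 : (["sellers", "sources"] : List String).contains command = false :=
        pvContainsFalse _ _ pvHrow4 command (by simp [hg'])
      rw [pvKey command command_list 2 hg' _ pvHrow2]
      simp only [check_no_duplicates, pvMatrix, pvGoRows, c, c0, c1, c3, c4, Bool.false_eq_true, if_false, if_true]
      cases hany : command_list.any (fun item => (["top", "bottom"] : List String).contains item) <;> simp [hany]
    case _ =>
      obtain rfl := Option.some.inj hchar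
      have hg' : pvGroupIdx.get? command = some 3 := (pvHrow3 command).mpr d
      have c0 : (["sellcountry", "sourcecountry", "sellregion", "sourceregion"] : List String).contains command = false :=
        pvContainsFalse _ _ pvHrow0 command (by simp [hg'])
      have c1 : (["ratings", "cocoa", "bars_sold"] : List String).contains command = false :=
        pvContainsFalse _ _ pvHrow1 command (by simp [hg'])
      have c2 : (["top", "bottom"] : List String).contains command = false :=
        pvContainsFalse _ _ pvHrow2 command (by simp [hg'])
      have c4 : (["sellers", "sources"] : List String).contains command = false :=
        pvContainsFalse _ _ pvHrow4 command (by simp [hg'])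
      rw [pvKey command command_list 3 hg' _ pvHrow3]
      simp only [check_no_duplicates, pvMatrix, pvGoRows, d, c0, c1, c2, c4, Bool.false_eq_true, if_false, if_true]
      cases hany : command_list.any (fun item => (["country", "region"] : List String).contains item) <;> simp [hany]
    case _ =>
      obtain rfl := Option.some.inj hchar
      have hg' : pvGroupIdx.get? command = some 4 := (pvHrow4 command).mpr e
      have c0 : (["sellcountry", "sourcecountry", "sellregion", "sourceregion"] : List String).contains command = false :=
        pvContainsFalse _ _ pvHrow0 command (by simp [hg'])
      have c1 : (["ratings", "cocoa", "bars_sold"] : List String).contains command = false :=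
        pvContainsFalse _ _ pvHrow1 command (by simp [hg'])
      have c2 : (["top", "bottom"] : List String).contains command = false :=
        pvContainsFalse _ _ pvHrow2 command (by simp [hg'])
      have c3 : (["country", "region"] : List String).contains command = false :=
        pvContainsFalse _ _ pvHrow3 command (by simp [hg'])
      rw [pvKey command command_list 4 hg' _ pvHrow4]
      simp only [check_no_duplicates, pvMatrix, pvGoRows, e, c0, c1, c2, c3, Bool.false_eq_true, if_false, if_true]
      cases hany : command_list.any (fun item => (["sellers", "sources"] : List String).contains item) <;> simp [hany]
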